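-- pv_equiv track=rewrite | github.com/Tian-hao/protease-inhibitor | lethal_fraction.py | make_depth
-- ===== SOURCE A (Python) =====
-- from itertools import combinations as comb
--
-- def make_depth(sindict):
--   depdict = {}
--   for i in range(1,10):
--     depth = 0
--     for muts in comb(sindict.keys(),i):
--       if len(set([mut[1:-1] for mut in muts])) == i:
--         depth += 1
--     depdict[i] = depth
--   return depdict
-- ===== SOURCE B (Python) =====
-- def make_depth(sindict):
--   cnt = {}
--   for mut in sindict:
--     p = mut[1:-1]
--     cnt[p] = cnt.get(p, 0) + 1
--   e = [1] + [0] * 9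
--   for c in cnt.values():
--     for j in range(9, 0, -1):
--       e[j] += c * e[j - 1]
--   return {i: e[i] for i in range(1, 10)}
-- ===== Notes on version B (the rewrite author's own statement) =====
-- stated objective: faster
-- what changed: Instead of enumerating all i-subsets of the keys for i=1..9 and testing position-distinctness, B counts keys per position (mut[1:-1]) in one pass and computes the elementary symmetric polynomials e_1..e_9 of the group sizes by a small DP, which equals the number of i-subsets with pairwise-distinct positions.
import Mathlib
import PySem

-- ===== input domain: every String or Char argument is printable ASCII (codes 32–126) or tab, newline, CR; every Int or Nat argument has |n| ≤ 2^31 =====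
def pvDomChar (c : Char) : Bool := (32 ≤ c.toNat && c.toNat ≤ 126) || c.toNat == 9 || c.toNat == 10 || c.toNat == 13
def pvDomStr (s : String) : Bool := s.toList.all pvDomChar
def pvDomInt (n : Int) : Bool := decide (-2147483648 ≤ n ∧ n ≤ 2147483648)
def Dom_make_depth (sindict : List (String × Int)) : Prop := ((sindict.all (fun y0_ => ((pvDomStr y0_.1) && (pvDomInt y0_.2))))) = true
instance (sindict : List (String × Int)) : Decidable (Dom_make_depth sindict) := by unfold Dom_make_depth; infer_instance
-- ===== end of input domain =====

-- B replaces A's enumeration of all i-subsets of the keys (i = 1..9) by a one-pass count of keys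
-- per position mu[1:-1] followed by a 9-step DP computing the elementary symmetric polynomials of
-- the group sizes; objective: faster.

-- ===== PORT A =====
-- mu[1:-1], shared by both ports
def pvMid (mu : String) : String := PySem.Str.slice mu (some 1) (some (-1))

-- itertools.combinations over a list, in itertools' order
def pvCombs (i : Nat) (xs : List String) : List (List String) :=
  match i, xs with
  | 0, _ => [[]]
  | _+1, [] => []
  | i+1, x :: rest => (pvCombs i rest).map (fun c => x :: c) ++ pvCombs (i+1) rest

def make_depth (sindict : List (String × Int)) : List (Int × Int) :=
  let keys := (PySem.Dict.ofList sindict).keys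
  -- i ∈ range(1,10) is nonnegative, so i.toNat is exact here
  ((PySem.List.pyRange 1 10 1).foldl (fun depdict i =>
    let depth : Int := (pvCombs i.toNat keys).foldl (fun depth muts =>
      if (((PySem.Set.ofList (muts.map pvMid)).length : Int) == i) then depth + 1 else depth) 0
    depdict.insert i depth) PySem.Dict.empty).items

-- ===== PORT B =====
def make_depth_alt (sindict : List (String × Int)) : List (Int × Int) :=
  let cnt := (PySem.Dict.ofList sindict).keys.foldl (fun d mu =>
      let p := pvMid mu
      d.insert p (d.getD p 0 + 1)) PySem.Dict.empty
  -- j ∈ range(9,0,-1) and i ∈ range(1,10) index the 10-element list e, always in range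
  let e := cnt.values.foldl (fun e c =>
      (PySem.List.pyRange 9 0 (-1)).foldl (fun e j =>
        PySem.List.pySetD e j (PySem.List.pyGetD e j 0 + c * PySem.List.pyGetD e (j - 1) 0)) e)
    ([1] ++ List.replicate 9 0)
  (PySem.List.pyRange 1 10 1).map (fun i => (i, PySem.List.pyGetD e i 0))

-- ===== PRECONDITION & SPEC =====
def Spec_make_depth (sindict : List (String × Int)) (out : List (Int × Int)) : Prop := out = make_depth_alt sindict
instance (sindict : List (String × Int)) (out : List (Int × Int)) : Decidable (Spec_make_depth sindict out) := by unfold Spec_make_depth; infer_instance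

-- ===== CLAIM (what is proved, stated in full; the proofs are below) =====
def Claim_equal_make_depth : Prop := ∀ (sindict : List (String × Int)), Dom_make_depth sindict → Spec_make_depth sindict (make_depth sindict)

-- ===== LEMMAS AND PROOFS =====

-- elementary symmetric polynomial e_i of a list of counts
def pvE : Nat → List Int → Int
  | 0, _ => 1
  | _+1, [] => 0
  | i+1, c :: cs => pvE (i+1) cs + c * pvE i cs

-- number of i-element sublists of K whose pvMid values are pairwise distinct and avoid S
def pvN : Nat → List String → List String → Int
  | 0, _, _ => 1
  | _+1, _, [] => 0
  | i+1, S, k :: K => pvN (i+1) S K + (if pvMid k ∈ S then 0 else pvN i (pvMid k :: S) K)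

-- group sizes of K by pvMid, for groups whose position avoids S
def pvG (S : List String) (K : List String) : List Int :=
  ((K.map pvMid).dedup.filter (fun q => decide (q ∉ S))).map (fun q => ((K.map pvMid).count q : Int))

theorem pvE_perm {cs cs' : List Int} (h : cs.Perm cs') : ∀ i, pvE i cs = pvE i cs' := by
  induction h with
  | nil => intro i; rfl
  | cons x h ih =>
    intro i
    cases i with
    | zero => rfl
    | succ i => simp [pvE, ih]
  | swap x y l =>
    intro i
    match i with
    | 0 => rfl
    | 1 => simp [pvE]; ring
    | (i+2) => simp [pvE]; ring
  | trans h1 h2 ih1 ih2 => intro i; rw [ih1, ih2]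

theorem filter_notMem_perm {p : String} {S : List String} (hp : p ∉ S) :
    ∀ (xs : List String), xs.Nodup → p ∈ xs →
    (xs.filter (fun q => decide (q ∉ S))).Perm
      (p :: xs.filter (fun q => decide (q ∉ (p :: S)))) := by
  intro xs
  induction xs with
  | nil => simp
  | cons x xs ih =>
    intro hnd hmem
    rcases List.mem_cons.mp hmem with rfl | hmem
    · have hpx : p ∉ xs := (List.nodup_cons.mp hnd).1
      have heq : xs.filter (fun q => decide (q ∉ S)) = xs.filter (fun q => decide (q ∉ (p :: S))) := by
        apply List.filter_congr
        intro q hq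
        have hqp : q ≠ p := fun h => hpx (h ▸ hq)
        simp [hqp]
      rw [List.filter_cons, if_pos (show (decide (p ∉ S)) = true by simp [hp]), heq,
          List.filter_cons, if_neg (show ¬ (decide (p ∉ (p :: S))) = true by simp)]
    · have hxp : x ≠ p := fun h => (List.nodup_cons.mp hnd).1 (h ▸ hmem)
      have ihh := ih (List.nodup_cons.mp hnd).2 hmem
      by_cases hx : x ∈ S
      · simpa [List.filter_cons, hx, hxp] using ihh
      · rw [List.filter_cons, if_pos (show (decide (x ∉ S)) = true by simp [hx]),
            List.filter_cons, if_pos (show (decide (x ∉ (p :: S))) = true by simp [hx, hxp])]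
        exact (ihh.cons x).trans (List.Perm.swap p x _)

theorem pvG_cons_mem (k : String) (K S : List String) (hp : pvMid k ∈ S) :
    pvG S (k :: K) = pvG S K := by
  unfold pvG
  simp only [List.map_cons]
  by_cases hm : pvMid k ∈ K.map pvMid
  · rw [List.dedup_cons_of_mem hm]
    apply List.map_congr_left
    intro q hq
    have hqS : q ∉ S := by simpa using (List.of_mem_filter hq)
    have hqp : q ≠ pvMid k := fun h => hqS (h ▸ hp)
    simp [List.count_cons, Ne.symm hqp]
  · rw [List.dedup_cons_of_notMem hm, List.filter_cons,
        if_neg (show ¬ (decide (pvMid k ∉ S)) = true by simp [hp])]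
    apply List.map_congr_left
    intro q hq
    have hqS : q ∉ S := by simpa using (List.of_mem_filter hq)
    have hqp : q ≠ pvMid k := fun h => hqS (h ▸ hp)
    simp [List.count_cons, Ne.symm hqp]

theorem pvG_cons_not_mem (k : String) (K S : List String) (hp : pvMid k ∉ S) (i : Nat) :
    pvE (i+1) (pvG S (k :: K)) = pvE (i+1) (pvG S K) + pvE i (pvG (pvMid k :: S) K) := by
  have tailmap : ∀ (L : List String),
      ((L.dedup.filter (fun q => decide (q ∉ (pvMid k :: S)))).map
        (fun q => (((pvMid k :: L).count q : Nat) : Int)))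
      = ((L.dedup.filter (fun q => decide (q ∉ (pvMid k :: S)))).map
        (fun q => ((L.count q : Nat) : Int))) := by
    intro L
    apply List.map_congr_left
    intro q hq
    have : q ≠ pvMid k := by
      have := List.of_mem_filter hq; simp at this; exact this.1
    simp [List.count_cons, Ne.symm this]
  by_cases hm : pvMid k ∈ K.map pvMid
  · -- P1 : pvG S (k::K) ~ (c+1) :: pvG (p::S) K
    have hmem : pvMid k ∈ (K.map pvMid).dedup := List.mem_dedup.mpr hm
    have hperm := filter_notMem_perm hp (K.map pvMid).dedup (List.nodup_dedup _) hmem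
    have p1 : (pvG S (k :: K)).Perm
        (((((K.map pvMid).count (pvMid k) : Nat) : Int) + 1) :: pvG (pvMid k :: S) K) := by
      unfold pvG
      simp only [List.map_cons, List.dedup_cons_of_mem hm]
      refine (hperm.map _).trans ?_
      simp only [List.map_cons, List.count_cons_self]
      rw [tailmap (K.map pvMid)]
      push_cast
      exact List.Perm.refl _
    have p2 : (pvG S K).Perm
        ((((K.map pvMid).count (pvMid k) : Nat) : Int) :: pvG (pvMid k :: S) K) := by
      unfold pvG
      refine (hperm.map _).trans ?_
      simp only [List.map_cons]
      exact List.Perm.refl _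
    rw [pvE_perm p1, pvE_perm p2]
    simp only [pvE]
    ring
  · -- count = 0 case
    have hc0 : (K.map pvMid).count (pvMid k) = 0 := List.count_eq_zero.mpr hm
    have hmd : pvMid k ∉ (K.map pvMid).dedup := fun h => hm (List.mem_dedup.mp h)
    have p1 : pvG S (k :: K) = (1 : Int) :: pvG (pvMid k :: S) K := by
      unfold pvG
      simp only [List.map_cons, List.dedup_cons_of_notMem hm, List.filter_cons,
        if_pos (show (decide (pvMid k ∉ S)) = true by simp [hp])]
      simp only [List.map_cons, List.count_cons_self, hc0]
      rw [show ((K.map pvMid).dedup.filter (fun q => decide (q ∉ S)))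
            = ((K.map pvMid).dedup.filter (fun q => decide (q ∉ (pvMid k :: S)))) from ?_]
      · rw [tailmap (K.map pvMid)]; norm_num
      · apply List.filter_congr
        intro q hq
        have hqp : q ≠ pvMid k := fun h => hmd (h ▸ hq)
        simp [hqp]
    have p2 : pvG S K = pvG (pvMid k :: S) K := by
      unfold pvG
      rw [show ((K.map pvMid).dedup.filter (fun q => decide (q ∉ S)))
            = ((K.map pvMid).dedup.filter (fun q => decide (q ∉ (pvMid k :: S)))) from ?_]
      · apply List.filter_congr
        intro q hq
        have hqp : q ≠ pvMid k := fun h => hmd (h ▸ hq)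
        simp [hqp]
    rw [p1, p2]
    simp only [pvE]
    ring

theorem pvN_eq_E (K : List String) : ∀ (S : List String) (i : Nat), pvN i S K = pvE i (pvG S K) := by
  induction K with
  | nil => intro S i; cases i <;> simp [pvN, pvG, pvE]
  | cons k K ih =>
    intro S i
    cases i with
    | zero => simp [pvN, pvE]
    | succ i =>
      by_cases hp : pvMid k ∈ S
      · rw [pvG_cons_mem k K S hp]
        simp [pvN, hp, ih]
      · rw [pvG_cons_not_mem k K S hp i]
        simp [pvN, hp, ih]

theorem countP_combs (K : List String) : ∀ (n : Nat) (S : List String),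
    ((pvCombs n K).countP
      (fun c => decide ((c.map pvMid).Nodup ∧ ∀ m ∈ c.map pvMid, m ∉ S)) : Int) = pvN n S K := by
  induction K with
  | nil =>
    intro n S
    cases n <;> simp [pvCombs, pvN, List.countP_singleton]
  | cons k K ih =>
    intro n S
    cases n with
    | zero => simp [pvCombs, pvN, List.countP_singleton]
    | succ i =>
      simp only [pvCombs, pvN, List.countP_append, List.countP_map]
      by_cases hp : pvMid k ∈ S
      · have h0 : (pvCombs i K).countP
            ((fun c => decide ((c.map pvMid).Nodup ∧ ∀ m ∈ c.map pvMid, m ∉ S)) ∘ (fun c => k :: c)) = 0 := by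
          apply List.countP_eq_zero.mpr
          intro c _
          simp only [Function.comp, List.map_cons, decide_eq_true_eq]
          intro hcon
          exact (hcon.2 (pvMid k) (List.mem_cons_self)) hp
        rw [h0, if_pos hp]
        push_cast
        rw [← ih (i+1) S]
        push_cast
        ring
      · have hpt : ∀ c, ((fun c => decide ((c.map pvMid).Nodup ∧ ∀ m ∈ c.map pvMid, m ∉ S)) ∘ (fun c => k :: c)) c
            = (fun c => decide ((c.map pvMid).Nodup ∧ ∀ m ∈ c.map pvMid, m ∉ (pvMid k :: S))) c := by
          intro c
          simp only [Function.comp, List.map_cons]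
          apply decide_eq_decide.mpr
          constructor
          · rintro ⟨hnd, hall⟩
            rcases List.nodup_cons.mp hnd with ⟨hnm, hnd'⟩
            refine ⟨hnd', ?_⟩
            intro m hm
            simp only [List.mem_cons]
            rintro (rfl | hmS)
            · exact hnm hm
            · exact (hall m (List.mem_cons_of_mem _ hm)) hmS
          · rintro ⟨hnd, hall⟩
            constructor
            · rw [List.nodup_cons]
              exact ⟨fun hmem => (hall _ hmem) (List.mem_cons_self), hnd⟩
            · intro m hm
              rcases List.mem_cons.mp hm with rfl | hm
              · exact hp
              · exact fun hS => (hall m hm) (List.mem_cons_of_mem _ hS)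
        rw [List.countP_congr (fun c _ => by rw [hpt c]), if_neg hp]
        push_cast
        rw [← ih i (pvMid k :: S), ← ih (i+1) S]
        push_cast
        ring

theorem foldl_if_count {α : Type} (p : α → Bool) :
    ∀ (l : List α) (a : Int), l.foldl (fun d x => if p x then d + 1 else d) a = a + l.countP p := by
  intro l
  induction l with
  | nil => intro a; simp
  | cons x l ih =>
    intro a
    by_cases h : p x <;> simp [List.countP_cons, h, ih] <;> push_cast <;> ring

theorem pvCombs_length (xs : List String) : ∀ (n : Nat), ∀ c ∈ pvCombs n xs, c.length = n := by
  induction xs with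
  | nil => intro n c hc; cases n <;> simp_all [pvCombs]
  | cons x xs ih =>
    intro n c hc
    cases n with
    | zero => simp_all [pvCombs]
    | succ n =>
      simp only [pvCombs, List.mem_append, List.mem_map] at hc
      rcases hc with ⟨c', hc', rfl⟩ | hc
      · simp [ih n c' hc']
      · exact ih (n+1) c hc

theorem ofList_len_eq_iff (xs : List String) :
    (PySem.Set.ofList xs).length = xs.length ↔ xs.Nodup := by
  have hperm : (PySem.Set.ofList xs).Perm xs.dedup := by
    rw [List.perm_ext_iff_of_nodup (PySem.Set.nodup_ofList xs) xs.nodup_dedup]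
    intro a; simp [PySem.Set.mem_ofList, List.mem_dedup]
  rw [hperm.length_eq]
  constructor
  · intro h
    have := List.Sublist.eq_of_length xs.dedup_sublist h
    rw [← this]; exact xs.nodup_dedup
  · intro h; rw [List.dedup_eq_self.mpr h]

theorem depth_eq (K : List String) (i : Int) (hi : 0 ≤ i) :
    (pvCombs i.toNat K).foldl (fun depth muts =>
      if (((PySem.Set.ofList (muts.map pvMid)).length : Int) == i) then depth + 1 else depth) (0:Int)
    = pvE i.toNat (pvG [] K) := by
  rw [foldl_if_count]
  have h := countP_combs K i.toNat []
  have hcong : (pvCombs i.toNat K).countP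
      (fun muts => (((PySem.Set.ofList (muts.map pvMid)).length : Int) == i))
    = (pvCombs i.toNat K).countP
      (fun c => decide ((c.map pvMid).Nodup ∧ ∀ m ∈ c.map pvMid, m ∉ ([] : List String))) := by
    apply List.countP_congr
    intro c hc
    have hlen : c.length = i.toNat := pvCombs_length K i.toNat c hc
    have hml : (c.map pvMid).length = i.toNat := by simp [hlen]
    have key : ((((PySem.Set.ofList (c.map pvMid)).length : Int) == i) = true)
        ↔ (c.map pvMid).Nodup := by
      rw [beq_iff_eq, ← ofList_len_eq_iff]
      have hle := PySem.Set.length_ofList_le (c.map pvMid)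
      constructor
      · intro hb; omega
      · intro he; rw [he, hml]; omega
    simp [key]
  rw [zero_add, hcong, h, pvN_eq_E]

-- the vector of e_0..e_9 maintained by B's DP
def pvEvec (cs : List Int) : List Int :=
  [pvE 0 cs, pvE 1 cs, pvE 2 cs, pvE 3 cs, pvE 4 cs,
   pvE 5 cs, pvE 6 cs, pvE 7 cs, pvE 8 cs, pvE 9 cs]

def pvStep (e : List Int) (c : Int) : List Int :=
  (PySem.List.pyRange 9 0 (-1)).foldl (fun e j =>
    PySem.List.pySetD e j (PySem.List.pyGetD e j 0 + c * PySem.List.pyGetD e (j - 1) 0)) e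

theorem pvStep_eval (c a0 a1 a2 a3 a4 a5 a6 a7 a8 a9 : Int) :
    pvStep [a0, a1, a2, a3, a4, a5, a6, a7, a8, a9] c
      = [a0, a1 + c*a0, a2 + c*a1, a3 + c*a2, a4 + c*a3,
         a5 + c*a4, a6 + c*a5, a7 + c*a6, a8 + c*a7, a9 + c*a8] := by
  simp [pvStep, show PySem.List.pyRange 9 0 (-1) = [9,8,7,6,5,4,3,2,1] from by decide,
    PySem.List.pySetD, PySem.List.pySet?, PySem.List.pyGetD, PySem.List.pyGet?, PySem.List.pyIdx?]

theorem pvStep_evec (l : List Int) (c : Int) : pvStep (pvEvec l) c = pvEvec (c :: l) := by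
  rw [pvEvec, pvStep_eval]
  simp [pvEvec, pvE]

theorem foldl_evec (cs : List Int) : ∀ (l : List Int), cs.foldl pvStep (pvEvec l) = pvEvec (cs.reverse ++ l) := by
  induction cs with
  | nil => intro l; simp
  | cons c cs ih =>
    intro l
    rw [List.foldl_cons, pvStep_evec, ih (c :: l)]
    simp

theorem values_perm (keys : List String) :
    ((keys.foldl (fun d mu => d.insert (pvMid mu) (d.getD (pvMid mu) 0 + 1))
        PySem.Dict.empty).values).Perm (pvG [] keys) := by
  have hfold : keys.foldl (fun d mu => d.insert (pvMid mu) (d.getD (pvMid mu) 0 + 1)) PySem.Dict.empty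
      = PySem.Dict.counter (keys.map pvMid) := by
    rw [← PySem.Dict.foldl_insert_getD_add_one_eq_counter, List.foldl_map]
  rw [hfold]
  have hvals : (PySem.Dict.counter (keys.map pvMid)).values
      = (PySem.Set.ofList (keys.map pvMid)).map (fun q => ((keys.map pvMid).count q : Int)) := by
    show ((PySem.Dict.counter (keys.map pvMid)).items.map Prod.snd) = _
    rw [PySem.Dict.items_counter]
    simp
  rw [hvals]
  have hsetperm : (PySem.Set.ofList (keys.map pvMid)).Perm (keys.map pvMid).dedup := by
    rw [List.perm_ext_iff_of_nodup (PySem.Set.nodup_ofList _) (keys.map pvMid).nodup_dedup]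
    intro a; simp [PySem.Set.mem_ofList, List.mem_dedup]
  have : pvG [] keys = ((keys.map pvMid).dedup.map (fun q => ((keys.map pvMid).count q : Int))) := by
    unfold pvG
    congr 1
    apply List.filter_eq_self.mpr
    intro q _; simp
  rw [this]
  exact hsetperm.map _

theorem make_depth_eval (sindict : List (String × Int)) :
    make_depth sindict
      = ([1,2,3,4,5,6,7,8,9] : List Int).map (fun i =>
          (i, pvE i.toNat (pvG [] ((PySem.Dict.ofList sindict).keys)))) := by
  unfold make_depth
  simp only []
  rw [show PySem.List.pyRange 1 10 1 = ([1,2,3,4,5,6,7,8,9] : List Int) from by decide]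
  rw [PySem.Dict.items_foldl_insert_fresh ([1,2,3,4,5,6,7,8,9] : List Int) (fun i => i)
        (fun i => (pvCombs i.toNat ((PySem.Dict.ofList sindict).keys)).foldl
          (fun depth muts =>
            if (((PySem.Set.ofList (muts.map pvMid)).length : Int) == i) then depth + 1 else depth) 0)
        PySem.Dict.empty (by intro a _; simp) (by simp)]
  show List.map _ _ = _
  apply List.map_congr_left
  intro i hi
  have hi0 : (0:Int) ≤ i := by
    fin_cases hi <;> norm_num
  rw [depth_eq _ i hi0]

theorem make_depth_alt_eval (sindict : List (String × Int)) :
    make_depth_alt sindict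
      = ([1,2,3,4,5,6,7,8,9] : List Int).map (fun i =>
          (i, pvE i.toNat (pvG [] ((PySem.Dict.ofList sindict).keys)))) := by
  unfold make_depth_alt
  simp only []
  rw [show (fun (e : List Int) (c : Int) =>
      (PySem.List.pyRange 9 0 (-1)).foldl (fun e j =>
        PySem.List.pySetD e j (PySem.List.pyGetD e j 0 + c * PySem.List.pyGetD e (j - 1) 0)) e)
      = pvStep from rfl]
  have hperm : ((((PySem.Dict.ofList sindict).keys.foldl (fun d mu =>
      d.insert (pvMid mu) (d.getD (pvMid mu) 0 + 1)) PySem.Dict.empty).values).reverse).Perm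
      (pvG [] ((PySem.Dict.ofList sindict).keys)) :=
    (List.reverse_perm _).trans (values_perm _)
  rw [show ([1] ++ List.replicate 9 0 : List Int) = pvEvec [] from rfl,
      foldl_evec _ [], List.append_nil]
  rw [show PySem.List.pyRange 1 10 1 = ([1,2,3,4,5,6,7,8,9] : List Int) from by decide]
  rw [pvEvec]
  simp only [List.map_cons, List.map_nil]
  norm_num [PySem.List.pyGetD, PySem.List.pyGet?, PySem.List.pyIdx?]
  refine ⟨?_, ?_, ?_, ?_, ?_, ?_, ?_, ?_, ?_⟩ <;>
    exact pvE_perm hperm _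

-- ===== VERDICT (by name: the statement is the Claim_ definition above) =====
theorem make_depth_spec : Claim_equal_make_depth := by
  unfold Claim_equal_make_depth
  intro sindict _
  unfold Spec_make_depth
  rw [make_depth_eval, make_depth_alt_eval]
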